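-- pv_equiv track=rewrite | github.com/rionkim54/mangsil_datalogger | usb_rs485_20230909.py | calculate_modbus_crc
-- ===== SOURCE A (Python) =====
-- def calculate_modbus_crc(data):
--     crc_table = (
--         0x0000, 0xC0C1, 0xC181, 0x0140, 0xC301, 0x03C0, 0x0280, 0xC241,
--         0xC601, 0x06C0, 0x0780, 0xC741, 0x0500, 0xC5C1, 0xC481, 0x0440,
--         0xCC01, 0x0CC0, 0x0D80, 0xCD41, 0x0F00, 0xCFC1, 0xCE81, 0x0E40,
--         0x0A00, 0xCAC1, 0xCB81, 0x0B40, 0xC901, 0x09C0, 0x0880, 0xC841,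
--         0xD801, 0x18C0, 0x1980, 0xD941, 0x1B00, 0xDBC1, 0xDA81, 0x1A40,
--         0x1E00, 0xDEC1, 0xDF81, 0x1F40, 0xDD01, 0x1DC0, 0x1C80, 0xDC41,
--         0x1400, 0xD4C1, 0xD581, 0x1540, 0xD701, 0x17C0, 0x1680, 0xD641,
--         0xD201, 0x12C0, 0x1380, 0xD341, 0x1100, 0xD1C1, 0xD081, 0x1040,
--         0xF001, 0x30C0, 0x3180, 0xF141, 0x3300, 0xF3C1, 0xF281, 0x3240,
--         0x3600, 0xF6C1, 0xF781, 0x3740, 0xF501, 0x35C0, 0x3480, 0xF441,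
--         0x3C00, 0xFCC1, 0xFD81, 0x3D40, 0xFF01, 0x3FC0, 0x3E80, 0xFE41,
--         0xFA01, 0x3AC0, 0x3B80, 0xFB41, 0x3900, 0xF9C1, 0xF881, 0x3840,
--         0x2800, 0xE8C1, 0xE981, 0x2940, 0xEB01, 0x2BC0, 0x2A80, 0xEA41,
--         0xEE01, 0x2EC0, 0x2F80, 0xEF41, 0x2D00, 0xEDC1, 0xEC81, 0x2C40,
--         0xE401, 0x24C0, 0x2580, 0xE541, 0x2700, 0xE7C1, 0xE681, 0x2640,
--         0x2200, 0xE2C1, 0xE381, 0x2340, 0xE101, 0x21C0, 0x2080, 0xE041,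
--         0xA001, 0x60C0, 0x6180, 0xA141, 0x6300, 0xA3C1, 0xA281, 0x6240,
--         0x6600, 0xA6C1, 0xA781, 0x6740, 0xA501, 0x65C0, 0x6480, 0xA441,
--         0x6C00, 0xACC1, 0xAD81, 0x6D40, 0xAF01, 0x6FC0, 0x6E80, 0xAE41,
--         0xAA01, 0x6AC0, 0x6B80, 0xAB41, 0x6900, 0xA9C1, 0xA881, 0x6840,
--         0x7800, 0xB8C1, 0xB981, 0x7940, 0xBB01, 0x7BC0, 0x7A80, 0xBA41,
--         0xBE01, 0x7EC0, 0x7F80, 0xBF41, 0x7D00, 0xBDC1, 0xBC81, 0x7C40,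
--         0xB401, 0x74C0, 0x7580, 0xB541, 0x7700, 0xB7C1, 0xB681, 0x7640,
--         0x7200, 0xB2C1, 0xB381, 0x7340, 0xB101, 0x71C0, 0x7080, 0xB041,
--         0x5000, 0x90C1, 0x9181, 0x5140, 0x9301, 0x53C0, 0x5280, 0x9241,
--         0x9601, 0x56C0, 0x5780, 0x9741, 0x5500, 0x95C1, 0x9481, 0x5440,
--         0x9C01, 0x5CC0, 0x5D80, 0x9D41, 0x5F00, 0x9FC1, 0x9E81, 0x5E40,
--         0x5A00, 0x9AC1, 0x9B81, 0x5B40, 0x9901, 0x59C0, 0x5880, 0x9841,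
--         0x8801, 0x48C0, 0x4980, 0x8941, 0x4B00, 0x8BC1, 0x8A81, 0x4A40,
--         0x4E00, 0x8EC1, 0x8F81, 0x4F40, 0x8D01, 0x4DC0, 0x4C80, 0x8C41,
--         0x4400, 0x84C1, 0x8581, 0x4540, 0x8701, 0x47C0, 0x4680, 0x8641,
--         0x8201, 0x42C0, 0x4380, 0x8341, 0x4100, 0x81C1, 0x8081, 0x4040,
--     )
--
--     crc = 0xFFFF
--     for byte in data:
--         index = (crc ^ byte) & 0xFF
--         crc = (crc >> 8) ^ crc_table[index]
--     return crc & 0xFFFF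
-- ===== SOURCE B (Python) =====
-- def calculate_modbus_crc(data):
--     crc = 0xFFFF
--     for byte in data:
--         crc ^= byte & 0xFF
--         for _ in range(8):
--             if crc & 1:
--                 crc = (crc >> 1) ^ 0xA001
--             else:
--                 crc >>= 1
--     return crc & 0xFFFF
-- ===== Notes on version B (the rewrite author's own statement) =====
-- stated objective: alternative
-- what changed: Drops the 256-entry lookup table and computes the reflected CRC-16/Modbus bit by bit: xor the (masked) byte into the crc, then eight rounds of shift-right with conditional xor of the polynomial 0xA001.
import Mathlib
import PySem

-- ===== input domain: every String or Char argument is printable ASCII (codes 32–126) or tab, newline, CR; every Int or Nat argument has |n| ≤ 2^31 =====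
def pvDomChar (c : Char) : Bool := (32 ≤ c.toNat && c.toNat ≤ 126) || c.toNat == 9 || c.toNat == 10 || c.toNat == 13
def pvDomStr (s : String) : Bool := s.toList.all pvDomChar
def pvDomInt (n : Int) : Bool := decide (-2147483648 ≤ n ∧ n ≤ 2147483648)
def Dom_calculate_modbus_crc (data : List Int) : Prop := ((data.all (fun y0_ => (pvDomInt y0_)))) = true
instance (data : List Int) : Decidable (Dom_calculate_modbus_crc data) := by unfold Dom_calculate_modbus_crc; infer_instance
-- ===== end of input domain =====

-- B replaces A's 256-entry table by the bit-at-a-time CRC-16/Modbus loop (polynomial 0xA001); same return value, no speed claim.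

-- ===== PORT A =====
def pvCrcTable : List Int := [
  0x0000, 0xC0C1, 0xC181, 0x0140, 0xC301, 0x03C0, 0x0280, 0xC241,
  0xC601, 0x06C0, 0x0780, 0xC741, 0x0500, 0xC5C1, 0xC481, 0x0440,
  0xCC01, 0x0CC0, 0x0D80, 0xCD41, 0x0F00, 0xCFC1, 0xCE81, 0x0E40,
  0x0A00, 0xCAC1, 0xCB81, 0x0B40, 0xC901, 0x09C0, 0x0880, 0xC841,
  0xD801, 0x18C0, 0x1980, 0xD941, 0x1B00, 0xDBC1, 0xDA81, 0x1A40,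
  0x1E00, 0xDEC1, 0xDF81, 0x1F40, 0xDD01, 0x1DC0, 0x1C80, 0xDC41,
  0x1400, 0xD4C1, 0xD581, 0x1540, 0xD701, 0x17C0, 0x1680, 0xD641,
  0xD201, 0x12C0, 0x1380, 0xD341, 0x1100, 0xD1C1, 0xD081, 0x1040,
  0xF001, 0x30C0, 0x3180, 0xF141, 0x3300, 0xF3C1, 0xF281, 0x3240,
  0x3600, 0xF6C1, 0xF781, 0x3740, 0xF501, 0x35C0, 0x3480, 0xF441,
  0x3C00, 0xFCC1, 0xFD81, 0x3D40, 0xFF01, 0x3FC0, 0x3E80, 0xFE41,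
  0xFA01, 0x3AC0, 0x3B80, 0xFB41, 0x3900, 0xF9C1, 0xF881, 0x3840,
  0x2800, 0xE8C1, 0xE981, 0x2940, 0xEB01, 0x2BC0, 0x2A80, 0xEA41,
  0xEE01, 0x2EC0, 0x2F80, 0xEF41, 0x2D00, 0xEDC1, 0xEC81, 0x2C40,
  0xE401, 0x24C0, 0x2580, 0xE541, 0x2700, 0xE7C1, 0xE681, 0x2640,
  0x2200, 0xE2C1, 0xE381, 0x2340, 0xE101, 0x21C0, 0x2080, 0xE041,
  0xA001, 0x60C0, 0x6180, 0xA141, 0x6300, 0xA3C1, 0xA281, 0x6240,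
  0x6600, 0xA6C1, 0xA781, 0x6740, 0xA501, 0x65C0, 0x6480, 0xA441,
  0x6C00, 0xACC1, 0xAD81, 0x6D40, 0xAF01, 0x6FC0, 0x6E80, 0xAE41,
  0xAA01, 0x6AC0, 0x6B80, 0xAB41, 0x6900, 0xA9C1, 0xA881, 0x6840,
  0x7800, 0xB8C1, 0xB981, 0x7940, 0xBB01, 0x7BC0, 0x7A80, 0xBA41,
  0xBE01, 0x7EC0, 0x7F80, 0xBF41, 0x7D00, 0xBDC1, 0xBC81, 0x7C40,
  0xB401, 0x74C0, 0x7580, 0xB541, 0x7700, 0xB7C1, 0xB681, 0x7640,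
  0x7200, 0xB2C1, 0xB381, 0x7340, 0xB101, 0x71C0, 0x7080, 0xB041,
  0x5000, 0x90C1, 0x9181, 0x5140, 0x9301, 0x53C0, 0x5280, 0x9241,
  0x9601, 0x56C0, 0x5780, 0x9741, 0x5500, 0x95C1, 0x9481, 0x5440,
  0x9C01, 0x5CC0, 0x5D80, 0x9D41, 0x5F00, 0x9FC1, 0x9E81, 0x5E40,
  0x5A00, 0x9AC1, 0x9B81, 0x5B40, 0x9901, 0x59C0, 0x5880, 0x9841,
  0x8801, 0x48C0, 0x4980, 0x8941, 0x4B00, 0x8BC1, 0x8A81, 0x4A40,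
  0x4E00, 0x8EC1, 0x8F81, 0x4F40, 0x8D01, 0x4DC0, 0x4C80, 0x8C41,
  0x4400, 0x84C1, 0x8581, 0x4540, 0x8701, 0x47C0, 0x4680, 0x8641,
  0x8201, 0x42C0, 0x4380, 0x8341, 0x4100, 0x81C1, 0x8081, 0x4040
]

def calculate_modbus_crc (data : List Int) : Int :=
  let crc := data.foldl (fun crc byte =>
    let index := PySem.Int.band (PySem.Int.bxor crc byte) 0xFF
    -- index is provably in [0, 256), so the pyGetD default is unreachable (Python never raises here)
    PySem.Int.bxor (crc >>> (8 : Nat)) (PySem.List.pyGetD pvCrcTable index 0)) 0xFFFF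
  PySem.Int.band crc 0xFFFF

-- ===== PORT B =====
def calculate_modbus_crc_alt (data : List Int) : Int :=
  let crc := data.foldl (fun crc byte =>
    let c := PySem.Int.bxor crc (PySem.Int.band byte 0xFF)
    (List.range 8).foldl (fun c _ =>
      if PySem.Int.band c 1 ≠ 0 then PySem.Int.bxor (c >>> (1 : Nat)) 0xA001
      else c >>> (1 : Nat)) c) 0xFFFF
  PySem.Int.band crc 0xFFFF

-- ===== PRECONDITION & SPEC =====
def Spec_calculate_modbus_crc (data : List Int) (out : Int) : Prop := out = calculate_modbus_crc_alt data
instance (data : List Int) (out : Int) : Decidable (Spec_calculate_modbus_crc data out) := by unfold Spec_calculate_modbus_crc; infer_instance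

-- ===== CLAIM (what is proved, stated in full; the proofs are below) =====
def Claim_equal_calculate_modbus_crc : Prop := ∀ (data : List Int), Dom_calculate_modbus_crc data → Spec_calculate_modbus_crc data (calculate_modbus_crc data)

-- ===== LEMMAS AND PROOFS =====

-- Nat twin of the table, for kernel computation
def tblNat : List Nat := [
  0x0000, 0xC0C1, 0xC181, 0x0140, 0xC301, 0x03C0, 0x0280, 0xC241,
  0xC601, 0x06C0, 0x0780, 0xC741, 0x0500, 0xC5C1, 0xC481, 0x0440,
  0xCC01, 0x0CC0, 0x0D80, 0xCD41, 0x0F00, 0xCFC1, 0xCE81, 0x0E40,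
  0x0A00, 0xCAC1, 0xCB81, 0x0B40, 0xC901, 0x09C0, 0x0880, 0xC841,
  0xD801, 0x18C0, 0x1980, 0xD941, 0x1B00, 0xDBC1, 0xDA81, 0x1A40,
  0x1E00, 0xDEC1, 0xDF81, 0x1F40, 0xDD01, 0x1DC0, 0x1C80, 0xDC41,
  0x1400, 0xD4C1, 0xD581, 0x1540, 0xD701, 0x17C0, 0x1680, 0xD641,
  0xD201, 0x12C0, 0x1380, 0xD341, 0x1100, 0xD1C1, 0xD081, 0x1040,
  0xF001, 0x30C0, 0x3180, 0xF141, 0x3300, 0xF3C1, 0xF281, 0x3240,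
  0x3600, 0xF6C1, 0xF781, 0x3740, 0xF501, 0x35C0, 0x3480, 0xF441,
  0x3C00, 0xFCC1, 0xFD81, 0x3D40, 0xFF01, 0x3FC0, 0x3E80, 0xFE41,
  0xFA01, 0x3AC0, 0x3B80, 0xFB41, 0x3900, 0xF9C1, 0xF881, 0x3840,
  0x2800, 0xE8C1, 0xE981, 0x2940, 0xEB01, 0x2BC0, 0x2A80, 0xEA41,
  0xEE01, 0x2EC0, 0x2F80, 0xEF41, 0x2D00, 0xEDC1, 0xEC81, 0x2C40,
  0xE401, 0x24C0, 0x2580, 0xE541, 0x2700, 0xE7C1, 0xE681, 0x2640,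
  0x2200, 0xE2C1, 0xE381, 0x2340, 0xE101, 0x21C0, 0x2080, 0xE041,
  0xA001, 0x60C0, 0x6180, 0xA141, 0x6300, 0xA3C1, 0xA281, 0x6240,
  0x6600, 0xA6C1, 0xA781, 0x6740, 0xA501, 0x65C0, 0x6480, 0xA441,
  0x6C00, 0xACC1, 0xAD81, 0x6D40, 0xAF01, 0x6FC0, 0x6E80, 0xAE41,
  0xAA01, 0x6AC0, 0x6B80, 0xAB41, 0x6900, 0xA9C1, 0xA881, 0x6840,
  0x7800, 0xB8C1, 0xB981, 0x7940, 0xBB01, 0x7BC0, 0x7A80, 0xBA41,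
  0xBE01, 0x7EC0, 0x7F80, 0xBF41, 0x7D00, 0xBDC1, 0xBC81, 0x7C40,
  0xB401, 0x74C0, 0x7580, 0xB541, 0x7700, 0xB7C1, 0xB681, 0x7640,
  0x7200, 0xB2C1, 0xB381, 0x7340, 0xB101, 0x71C0, 0x7080, 0xB041,
  0x5000, 0x90C1, 0x9181, 0x5140, 0x9301, 0x53C0, 0x5280, 0x9241,
  0x9601, 0x56C0, 0x5780, 0x9741, 0x5500, 0x95C1, 0x9481, 0x5440,
  0x9C01, 0x5CC0, 0x5D80, 0x9D41, 0x5F00, 0x9FC1, 0x9E81, 0x5E40,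
  0x5A00, 0x9AC1, 0x9B81, 0x5B40, 0x9901, 0x59C0, 0x5880, 0x9841,
  0x8801, 0x48C0, 0x4980, 0x8941, 0x4B00, 0x8BC1, 0x8A81, 0x4A40,
  0x4E00, 0x8EC1, 0x8F81, 0x4F40, 0x8D01, 0x4DC0, 0x4C80, 0x8C41,
  0x4400, 0x84C1, 0x8581, 0x4540, 0x8701, 0x47C0, 0x4680, 0x8641,
  0x8201, 0x42C0, 0x4380, 0x8341, 0x4100, 0x81C1, 0x8081, 0x4040
]

-- A's per-byte update and B's per-byte update, as named functions (definitionally the ports' lambdas)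
def stepA (crc byte : Int) : Int :=
  PySem.Int.bxor (crc >>> (8 : Nat))
    (PySem.List.pyGetD pvCrcTable (PySem.Int.band (PySem.Int.bxor crc byte) 0xFF) 0)

def intBitStep (c : Int) : Int :=
  if PySem.Int.band c 1 ≠ 0 then PySem.Int.bxor (c >>> (1 : Nat)) 0xA001 else c >>> (1 : Nat)

def stepB (crc byte : Int) : Int :=
  (List.range 8).foldl (fun c _ => intBitStep c) (PySem.Int.bxor crc (PySem.Int.band byte 0xFF))

def natBitStep (c : Nat) : Nat := if c &&& 1 = 1 then (c >>> 1) ^^^ 0xA001 else c >>> 1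
def natStep8 (c : Nat) : Nat := (List.range 8).foldl (fun c _ => natBitStep c) c

theorem portA_eq (data : List Int) :
    calculate_modbus_crc data = PySem.Int.band (data.foldl stepA 0xFFFF) 0xFFFF := rfl

theorem portB_eq (data : List Int) :
    calculate_modbus_crc_alt data = PySem.Int.band (data.foldl stepB 0xFFFF) 0xFFFF := rfl

theorem natStep8_eq (c : Nat) :
    natStep8 c = natBitStep (natBitStep (natBitStep (natBitStep
      (natBitStep (natBitStep (natBitStep (natBitStep c))))))) := rfl

set_option maxRecDepth 2000 in
theorem tbl_is_step8 : ∀ l < 256, natStep8 l = tblNat.getD l 0 := by decide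

set_option maxRecDepth 2000 in
theorem step8_hi : ∀ h < 256, natStep8 (256 * h) = h := by decide

set_option maxRecDepth 2000 in
theorem sub_eq_xor255 : ∀ y < 256, 255 - y = 255 ^^^ y := by decide

set_option maxRecDepth 2000 in
theorem tbl_cast : ∀ k : Nat, k < 256 →
    PySem.List.pyGetD pvCrcTable ((k : Nat) : Int) 0 = ((tblNat.getD k 0 : Nat) : Int) := by decide

set_option maxRecDepth 2000 in
theorem tbl_lt : ∀ k < 256, tblNat.getD k 0 < 65536 := by decide

theorem bitStep_lin (a b : Nat) : natBitStep (a ^^^ b) = natBitStep a ^^^ natBitStep b := by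
  unfold natBitStep
  have h1 : (a ^^^ b) &&& 1 = (a &&& 1) ^^^ (b &&& 1) := Nat.and_xor_distrib_right
  have h2 : (a ^^^ b) >>> 1 = a >>> 1 ^^^ b >>> 1 := Nat.shiftRight_xor_distrib
  have ha : a &&& 1 = 0 ∨ a &&& 1 = 1 := by have := Nat.and_one_is_mod a; omega
  have hb : b &&& 1 = 0 ∨ b &&& 1 = 1 := by have := Nat.and_one_is_mod b; omega
  rcases ha with ha | ha <;> rcases hb with hb | hb <;>
    simp [h1, h2, ha, hb, Nat.xor_assoc, Nat.xor_comm, Nat.xor_self, Nat.xor_left_comm]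

theorem step8_lin (a b : Nat) : natStep8 (a ^^^ b) = natStep8 a ^^^ natStep8 b := by
  simp only [natStep8_eq, bitStep_lin]

theorem xor_add_disj (h l : Nat) (hl : l < 256) : 256 * h ^^^ l = 256 * h + l := by
  have h2 : (256:Nat) = 2^8 := by norm_num
  apply Nat.eq_of_testBit_eq
  intro i
  rw [h2, Nat.testBit_two_pow_mul_add h (by simpa using hl), Nat.testBit_xor,
    Nat.testBit_two_pow_mul]
  by_cases hi : i < 8
  · simp [hi, show ¬ (8 ≤ i) by omega]
  · simp [hi, show 8 ≤ i by omega, Nat.testBit_eq_false_of_lt (lt_of_lt_of_le hl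
      (by simpa using Nat.pow_le_pow_right (by norm_num : 1 ≤ 2) (by omega : 8 ≤ i)))]

theorem step8_split : ∀ c < 65536, natStep8 c = (c >>> 8) ^^^ tblNat.getD (c &&& 255) 0 := by
  intro c hc
  have hmod : c &&& 255 = c % 256 := by simpa using Nat.and_two_pow_sub_one_eq_mod c 8
  have hdiv : c >>> 8 = c / 256 := by simpa using Nat.shiftRight_eq_div_pow c 8
  have hsplit : 256 * (c / 256) ^^^ c % 256 = c := by
    rw [xor_add_disj _ _ (Nat.mod_lt _ (by omega))]; omega
  have key : natStep8 c = (c / 256) ^^^ tblNat.getD (c % 256) 0 := by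
    conv_lhs => rw [← hsplit]
    rw [step8_lin, step8_hi _ (by omega), tbl_is_step8 _ (Nat.mod_lt _ (by omega))]
  rw [hmod, hdiv, key]

theorem maskNat1 (n bn : Nat) : (n ^^^ bn) &&& 255 = (n ^^^ (bn &&& 255)) &&& 255 := by
  rw [Nat.and_xor_distrib_right, Nat.and_xor_distrib_right, Nat.and_assoc, Nat.and_self]

theorem maskNat2 (n m : Nat) :
    255 - (255 &&& (n ^^^ m)) = (n ^^^ (255 - (255 &&& m))) &&& 255 := by
  have h1 : 255 &&& (n ^^^ m) < 256 := by have := Nat.and_le_left (n := 255) (m := n ^^^ m); omega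
  have h2 : 255 &&& m < 256 := by have := Nat.and_le_left (n := 255) (m := m); omega
  rw [sub_eq_xor255 _ h1, sub_eq_xor255 _ h2]
  apply Nat.eq_of_testBit_eq
  intro i
  simp only [Nat.testBit_xor, Nat.testBit_land]
  cases h255 : (255:Nat).testBit i <;> cases hn : n.testBit i <;> cases hm : m.testBit i <;> simp

-- the masked byte is a Nat below 256
theorem band255_cast (b : Int) :
    PySem.Int.band b 255 = ↑((PySem.Int.band b 255).toNat) ∧ (PySem.Int.band b 255).toNat < 256 := by
  by_cases hb : 0 ≤ b
  · rw [PySem.Int.band_of_nonneg hb (by norm_num)]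
    refine ⟨by simp, ?_⟩
    have h : b.toNat &&& (255:Int).toNat ≤ (255:Int).toNat := Nat.and_le_right
    simp only [Int.toNat_natCast, show (255:Int).toNat = 255 from rfl] at h ⊢
    omega
  · have h255 : (0:Int) ≤ 255 := by norm_num
    simp only [PySem.Int.band, if_neg hb, if_pos h255]
    refine ⟨by simp, ?_⟩
    simp only [Int.toNat_natCast]
    omega

theorem index_eq (n : Nat) (b : Int) :
    PySem.Int.band (PySem.Int.bxor (↑n) b) 255
      = ↑((n ^^^ (PySem.Int.band b 255).toNat) &&& 255) := by
  by_cases hb : 0 ≤ b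
  · rw [PySem.Int.bxor_of_nonneg (Int.natCast_nonneg n) hb,
      PySem.Int.band_of_nonneg hb (by norm_num),
      PySem.Int.band_of_nonneg (Int.natCast_nonneg _) (by norm_num)]
    simp only [Int.toNat_natCast, show (255:Int).toNat = 255 from rfl]
    exact congrArg Nat.cast (maskNat1 n b.toNat)
  · have hxor : PySem.Int.bxor (↑n) b = -↑(n ^^^ (-b - 1).toNat) - 1 := by
      simp only [PySem.Int.bxor, if_pos (Int.natCast_nonneg n), if_neg hb, Int.toNat_natCast]
    have hneg : ¬ (0 : Int) ≤ -↑(n ^^^ (-b - 1).toNat) - 1 := by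
      have := Int.natCast_nonneg (n ^^^ (-b - 1).toNat); omega
    rw [hxor]
    simp only [PySem.Int.band, if_neg hneg, if_neg hb, if_pos (by norm_num : (0:Int) ≤ 255)]
    simp only [Int.toNat_natCast]
    have harg : (-(-(↑(n ^^^ (-b - 1).toNat) : Int) - 1) - 1).toNat = n ^^^ (-b - 1).toNat := by
      omega
    rw [harg]
    simp only [show (255:Int).toNat = 255 from rfl]
    exact congrArg Nat.cast (maskNat2 n (-b - 1).toNat)

theorem bitStep_cast (m : Nat) : intBitStep (↑m) = ↑(natBitStep m) := by
  unfold intBitStep natBitStep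
  have hb : PySem.Int.band (↑m) 1 = ↑(m &&& 1) := by exact_mod_cast PySem.Int.band_natCast m 1
  have h01 : m &&& 1 = 0 ∨ m &&& 1 = 1 := by have := Nat.and_one_is_mod m; omega
  have hs : ((↑m : Int) >>> (1 : Nat)) = ↑(m >>> 1) := rfl
  rcases h01 with h | h
  · rw [hb, h, if_neg (by norm_num), if_neg (by omega), hs]
  · rw [hb, h, if_pos (by norm_num), hs]
    simp only [reduceIte]
    exact_mod_cast PySem.Int.bxor_natCast (m >>> 1) 40961

theorem foldBit_cast (L : List Nat) (m : Nat) :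
    L.foldl (fun c _ => intBitStep c) (↑m) = ↑(L.foldl (fun c _ => natBitStep c) m) := by
  induction L generalizing m with
  | nil => rfl
  | cons x xs ih => simp only [List.foldl_cons, bitStep_cast]; exact ih _

theorem stepB_cast (n : Nat) (b : Int) :
    stepB (↑n) b = ↑(natStep8 (n ^^^ (PySem.Int.band b 255).toNat)) := by
  unfold stepB natStep8
  rw [(band255_cast b).1]
  have hx : PySem.Int.bxor (↑n) (↑((PySem.Int.band b 255).toNat))
      = ↑(n ^^^ (PySem.Int.band b 255).toNat) := by
    exact_mod_cast PySem.Int.bxor_natCast n (PySem.Int.band b 255).toNat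
  rw [hx]
  exact foldBit_cast _ _

theorem stepA_cast (n : Nat) (b : Int) :
    stepA (↑n) b
      = ↑((n >>> 8) ^^^ tblNat.getD ((n ^^^ (PySem.Int.band b 255).toNat) &&& 255) 0) := by
  unfold stepA
  rw [index_eq, tbl_cast _ (by
    have : (n ^^^ (PySem.Int.band b 255).toNat) &&& 255 ≤ 255 := Nat.and_le_right
    omega)]
  have hs : ((↑n : Int) >>> (8 : Nat)) = ↑(n >>> 8) := rfl
  rw [hs]
  exact_mod_cast PySem.Int.bxor_natCast (n >>> 8) _

theorem step_eq (n : Nat) (hn : n < 65536) (b : Int) :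
    ∃ k : Nat, k < 65536 ∧ stepA (↑n) b = ↑k ∧ stepB (↑n) b = ↑k := by
  set y := (PySem.Int.band b 255).toNat with hy
  have hy256 : y < 256 := (band255_cast b).2
  have h16 : (65536 : Nat) = 2 ^ 16 := by norm_num
  have hy16 : y < 2 ^ 16 := lt_trans hy256 (by norm_num)
  have hc : n ^^^ y < 65536 := by
    rw [h16]; exact Nat.xor_lt_two_pow (h16 ▸ hn) hy16
  have hsh : (n ^^^ y) >>> 8 = n >>> 8 := by
    rw [Nat.shiftRight_xor_distrib]
    have h0 : y >>> 8 = 0 := by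
      rw [Nat.shiftRight_eq_div_pow]; omega
    simp [h0]
  have hb1 : n >>> 8 < 2 ^ 16 :=
    lt_of_le_of_lt (Nat.shiftRight_le n 8) (h16 ▸ hn)
  have hb2 : tblNat.getD ((n ^^^ y) &&& 255) 0 < 2 ^ 16 := by
    have h := tbl_lt ((n ^^^ y) &&& 255) (by
      have : (n ^^^ y) &&& 255 ≤ 255 := Nat.and_le_right; omega)
    exact lt_of_lt_of_le h (by norm_num)
  refine ⟨(n >>> 8) ^^^ tblNat.getD ((n ^^^ y) &&& 255) 0, ?_, stepA_cast n b, ?_⟩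
  · rw [h16]; exact Nat.xor_lt_two_pow hb1 hb2
  · rw [stepB_cast, step8_split _ hc, hsh]

theorem claim_fold : ∀ (data : List Int) (n : Nat), n < 65536 →
    ∃ k : Nat, k < 65536 ∧ data.foldl stepA (↑n) = ↑k ∧ data.foldl stepB (↑n) = ↑k := by
  intro data
  induction data with
  | nil => exact fun n hn => ⟨n, hn, rfl, rfl⟩
  | cons b rest ih =>
    intro n hn
    obtain ⟨k, hk, hA, hB⟩ := step_eq n hn b
    obtain ⟨k2, hk2, hA2, hB2⟩ := ih k hk
    exact ⟨k2, hk2, by simpa [hA] using hA2, by simpa [hB] using hB2⟩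

-- ===== VERDICT (by name: the statement is the Claim_ definition above) =====
theorem calculate_modbus_crc_spec : Claim_equal_calculate_modbus_crc := by
  intro data _
  unfold Spec_calculate_modbus_crc
  rw [portA_eq, portB_eq]
  obtain ⟨k, -, hA, hB⟩ := claim_fold data 65535 (by omega)
  have h0 : (0xFFFF : Int) = ((65535 : Nat) : Int) := by norm_num
  rw [h0, hA, hB]
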